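-- pv_equiv track=rewrite | github.com/cw417/inverted-index-search | invert.py | collect_documents
-- ===== SOURCE A (Python) =====
-- def collect_documents(list) -> [str]:
--   """Collects lines associated with the same document into sublists of a larger list."""
--   return_list = []
--   sublist = []
--   for line in list:
--     if line[0][0:2] == ".I":
--       # documents start with .I
--       # if we find a line that starts with .I, then append the sublist to  return_list and start new sublist
--       return_list.append(sublist)
--       sublist = [line]
--     else:
--       sublist.append(line)
--   # append anything left over in sublist
--   return_list.append(sublist)
--   # remove first empty list
--   return return_list[1:]
-- ===== SOURCE B (Python) =====
-- def collect_documents(list):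
--   """Collects lines associated with the same document into sublists of a larger list."""
--   # index-first-then-slice: collect the positions of all ".I" marker lines,
--   # then cut the list between consecutive markers (last marker runs to the end)
--   markers = [i for i, line in enumerate(list) if line[0][0:2] == ".I"]
--   markers.append(len(list))
--   return [list[a:b] for a, b in zip(markers, markers[1:])]
-- ===== Notes on version B (the rewrite author's own statement) =====
-- stated objective: alternative
-- what changed: B first collects the indices of all .I marker lines in one pass, then builds each document by slicing the original list between consecutive marker indices (last marker to the end), instead of A's incremental sublist accumulator that appends a dummy first group and removes it with [1:].
import Mathlib
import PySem

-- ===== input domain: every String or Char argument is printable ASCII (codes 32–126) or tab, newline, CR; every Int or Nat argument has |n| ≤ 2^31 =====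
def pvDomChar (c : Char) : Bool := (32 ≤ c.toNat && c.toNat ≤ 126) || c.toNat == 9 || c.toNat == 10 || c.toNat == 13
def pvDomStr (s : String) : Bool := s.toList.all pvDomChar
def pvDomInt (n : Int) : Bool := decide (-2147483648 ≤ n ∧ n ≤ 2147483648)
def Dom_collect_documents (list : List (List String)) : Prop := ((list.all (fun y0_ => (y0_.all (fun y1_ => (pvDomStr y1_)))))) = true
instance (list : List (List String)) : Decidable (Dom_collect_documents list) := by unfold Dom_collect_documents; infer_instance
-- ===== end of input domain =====

-- B collects the indices of all ".I" marker lines first and then slices the list between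
-- consecutive markers, instead of A's incremental accumulator with a dummy first group
-- removed by [1:]; objective: alternative (same O(n) cost, different decomposition).
-- ===== PORT A =====
-- line[0][0:2] == ".I"; Pre_ guarantees line is nonempty, so getD "" is never the fallback
def pvMark (line : List String) : Bool :=
  PySem.Str.slice ((PySem.List.pyGet? line 0).getD "") (some 0) (some 2) == ".I"

def collect_documents (list : List (List String)) : List (List (List String)) :=
  let st := list.foldl
    (fun (acc : List (List (List String)) × List (List String)) line =>
      if pvMark line then (acc.1 ++ [acc.2], [line]) else (acc.1, acc.2 ++ [line]))
    ([], [])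
  -- return_list.append(sublist); return return_list[1:]
  PySem.List.slice (st.1 ++ [st.2]) (some 1) none

-- ===== PORT B =====
def collect_documents_alt (list : List (List String)) : List (List (List String)) :=
  -- markers = [i for i, line in enumerate(list) if line[0][0:2] == ".I"]; markers.append(len(list))
  let markers : List Int :=
    ((PySem.List.enumerate list 0).filter (fun p => pvMark p.2)).map (fun p => p.1)
      ++ [(list.length : Int)]
  -- [list[a:b] for a, b in zip(markers, markers[1:])]
  (markers.zip (PySem.List.slice markers (some 1) none)).map
    (fun ab => PySem.List.slice list (some ab.1) (some ab.2))

-- ===== PRECONDITION & SPEC =====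
-- Pre_ excludes lists containing an empty line (no tokens): both A and B raise IndexError on line[0] there.
def Pre_collect_documents (list : List (List String)) : Prop := ∀ line ∈ list, line ≠ []
instance (list : List (List String)) : Decidable (Pre_collect_documents list) := by unfold Pre_collect_documents; infer_instance
def pvWitness_collect_documents : List (List String) := [[".I 1"], ["hello", "world"], [".I 2"], ["bye"]]
def Spec_collect_documents (list : List (List String)) (out : List (List (List String))) : Prop := out = collect_documents_alt list
instance (list : List (List String)) (out : List (List (List String))) : Decidable (Spec_collect_documents list out) := by unfold Spec_collect_documents; infer_instance

-- ===== CLAIM (what is proved, stated in full; the proofs are below) =====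
def Claim_equal_collect_documents : Prop := ∀ (list : List (List String)), Dom_collect_documents list → Pre_collect_documents list → Spec_collect_documents list (collect_documents list)

-- ===== LEMMAS AND PROOFS =====
-- the documents of l: one group per ".I" marker line, running to the next marker
def pvGroups (l : List (List String)) : List (List (List String)) :=
  match l with
  | [] => []
  | x :: xs =>
    if pvMark x then (x :: xs.takeWhile (fun y => !pvMark y)) :: pvGroups xs else pvGroups xs

-- A-side: characterisation of A's running state (return_list ++ [sublist])
def pvAux (l : List (List String)) (sub : List (List String)) : List (List (List String)) :=
  match l with
  | [] => [sub]
  | x :: xs => if pvMark x then sub :: pvAux xs [x] else pvAux xs (sub ++ [x])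

lemma pvAux_eq (l : List (List String)) : ∀ sub,
    pvAux l sub = (sub ++ l.takeWhile (fun y => !pvMark y)) :: pvGroups l := by
  induction l with
  | nil => intro sub; simp [pvAux, pvGroups]
  | cons x xs ih =>
    intro sub
    by_cases h : pvMark x
    · simp [pvAux, pvGroups, h, ih [x]]
    · simp [pvAux, pvGroups, h, ih (sub ++ [x])]

lemma foldA_eq (l : List (List String)) : ∀ acc sub,
    (let st := l.foldl
      (fun (acc : List (List (List String)) × List (List String)) line =>
        if pvMark line then (acc.1 ++ [acc.2], [line]) else (acc.1, acc.2 ++ [line]))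
      (acc, sub)
     st.1 ++ [st.2]) = acc ++ pvAux l sub := by
  induction l with
  | nil => intro acc sub; simp [pvAux]
  | cons x xs ih =>
    intro acc sub
    by_cases h : pvMark x
    · simpa [List.foldl_cons, h, pvAux] using ih (acc ++ [sub]) [x]
    · simpa [List.foldl_cons, h, pvAux] using ih acc (sub ++ [x])

-- B-side: marker indices as naturals
def pvMks (l : List (List String)) : List Nat :=
  match l with
  | [] => []
  | x :: xs => if pvMark x then 0 :: (pvMks xs).map (· + 1) else (pvMks xs).map (· + 1)
lemma enum_filter_eq (l : List (List String)) : ∀ (s : Int),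
    (((PySem.List.enumerate l s).filter (fun p => pvMark p.2)).map (fun p => p.1))
      = List.map (fun (m : Nat) => s + (m : Int)) (pvMks l) := by
  induction l with
  | nil => intro s; simp [PySem.List.enumerate_nil, pvMks]
  | cons x xs ih =>
    intro s
    rw [PySem.List.enumerate_cons]
    by_cases h : pvMark x
    · simp only [pvMks, List.filter_cons, h, if_true, List.map_cons, ih (s+1), List.map_map]
      refine List.cons_eq_cons.mpr ⟨by simp, ?_⟩
      congr 1; funext m; simp; ring
    · simp only [pvMks, List.filter_cons, h, Bool.false_eq_true, if_false, ih (s+1), List.map_map]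
      congr 1; funext m; simp; ring
def pvPairSlices (l : List (List String)) : List Nat → List (List (List String))
  | a :: b :: rest => (l.drop a).take (b - a) :: pvPairSlices l (b :: rest)
  | _ => []
lemma zip_slices_eq (l : List (List String)) (M : List Nat) :
    ((((List.map (fun (m : Nat) => (m : Int)) M)).zip
        (PySem.List.slice (List.map (fun (m : Nat) => (m : Int)) M) (some 1) none)).map
      (fun ab => PySem.List.slice l (some ab.1) (some ab.2))) = pvPairSlices l M := by
  rw [PySem.List.slice_from_one]
  induction M with
  | nil => simp [pvPairSlices]
  | cons a M ih =>
    cases M with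
    | nil => simp [pvPairSlices]
    | cons b rest =>
      simp only [List.map_cons, List.tail_cons, List.zip_cons_cons, pvPairSlices]
      rw [PySem.List.slice_natCast]
      exact List.cons_eq_cons.mpr ⟨rfl, by simpa using ih⟩
lemma pairSlices_shift (x : List String) (l : List (List String)) : ∀ (M : List Nat),
    pvPairSlices (x :: l) (M.map (· + 1)) = pvPairSlices l M := by
  intro M
  induction M with
  | nil => simp [pvPairSlices]
  | cons a M ih =>
    cases M with
    | nil => simp [pvPairSlices]
    | cons b rest =>
      simp only [List.map_cons, pvPairSlices, List.drop_succ_cons] at *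
      exact List.cons_eq_cons.mpr ⟨by congr 1; omega, ih⟩
lemma head_mks (xs : List (List String)) :
    (pvMks xs ++ [xs.length]).head? = some ((xs.takeWhile (fun y => !pvMark y)).length) := by
  induction xs with
  | nil => simp [pvMks]
  | cons x xs ih =>
    by_cases h : pvMark x
    · simp [pvMks, h]
    · simp only [pvMks, h, Bool.false_eq_true, if_false, List.takeWhile_cons, Bool.not_false]
      cases hm : pvMks xs with
      | nil => simp [hm] at ih ⊢; omega
      | cons m ms => simp [hm] at ih ⊢; omega
lemma take_takeWhile_len {α : Type} (p : α → Bool) (l : List α) :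
    l.take ((l.takeWhile p).length) = l.takeWhile p :=
  ((List.prefix_iff_eq_take).1 (List.takeWhile_prefix p)).symm
lemma pairSlices_mks (l : List (List String)) :
    pvPairSlices l (pvMks l ++ [l.length]) = pvGroups l := by
  induction l with
  | nil => simp [pvMks, pvPairSlices, pvGroups]
  | cons x xs ih =>
    by_cases h : pvMark x
    · have hcomb : pvMks (x :: xs) ++ [(x :: xs).length]
          = 0 :: (pvMks xs ++ [xs.length]).map (· + 1) := by
        simp [pvMks, h, List.length_cons]
      rw [hcomb]
      obtain ⟨m, M', hM⟩ : ∃ m M', pvMks xs ++ [xs.length] = m :: M' := by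
        cases hm : pvMks xs with
        | nil => exact ⟨_, _, rfl⟩
        | cons a b => exact ⟨_, _, rfl⟩
      have hm0 : m = (xs.takeWhile (fun y => !pvMark y)).length := by
        have := head_mks xs; rw [hM] at this; simpa using this
      rw [hM]
      simp only [List.map_cons, pvPairSlices, pvGroups, if_pos h]
      refine List.cons_eq_cons.mpr ⟨?_, ?_⟩
      · simp only [Nat.sub_zero, List.drop_zero, List.take_succ_cons]
        rw [hm0, take_takeWhile_len]
      · rw [show ((m+1) :: M'.map (· + 1)) = ((m :: M').map (· + 1)) by simp,
          pairSlices_shift, ← hM, ih]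
    · have hcomb : pvMks (x :: xs) ++ [(x :: xs).length]
          = (pvMks xs ++ [xs.length]).map (· + 1) := by
        simp [pvMks, h, List.length_cons]
      rw [hcomb, pairSlices_shift, ih]
      simp [pvGroups, h]

-- ===== VERDICT (by name: the statement is the Claim_ definition above) =====
theorem collect_documents_spec : Claim_equal_collect_documents := by
  intro l _ _
  show collect_documents l = collect_documents_alt l
  unfold collect_documents collect_documents_alt
  simp only
  have hA := foldA_eq l [] []
  simp only at hA
  rw [PySem.List.slice_from_one, enum_filter_eq l 0]
  have hmap : (List.map (fun (m : Nat) => (0 : Int) + (m : Int)) (pvMks l) ++ [(l.length : Int)])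
      = List.map (fun (m : Nat) => (m : Int)) (pvMks l ++ [l.length]) := by
    simp
  rw [hmap, zip_slices_eq, pairSlices_mks]
  have hst : (l.foldl
      (fun (acc : List (List (List String)) × List (List String)) line =>
        if pvMark line then (acc.1 ++ [acc.2], [line]) else (acc.1, acc.2 ++ [line]))
      ([], [])).1 ++ [(l.foldl
      (fun (acc : List (List (List String)) × List (List String)) line =>
        if pvMark line then (acc.1 ++ [acc.2], [line]) else (acc.1, acc.2 ++ [line]))
      ([], [])).2] = pvAux l [] := hA
  rw [hst, pvAux_eq]
  simp
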